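-- pv_equiv track=rewrite | github.com/i-seesharp/reddit_political_persuasion | Code/a1_extractFeatures.py | future_tense_verbs
-- ===== SOURCE A (Python) =====
-- def future_tense_verbs(worded_sentences):
--     s = 0
--     possible = ["'ll", "will", "gonna"]
--     for words in worded_sentences:
--         for i in range(len(words)):
--             word, tag = words[i]
--             if word.lower() in possible:
--                 s = s + 1
--             if tag == "VB" and i > 0:
--                 new_word, new_tag = words[i-1]
--                 if new_word == "going-to":  # Since we hyphenated going-to in preprocessing
--                     s = s + 1
--     return s
-- ===== SOURCE B (Python) =====
-- def future_tense_verbs(worded_sentences):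
--     markers = ["'ll", "will", "gonna"]
--     marker_count = sum(
--         sum(1 for word, _tag in words if word.lower() in markers)
--         for words in worded_sentences
--     )
--     going_to_count = sum(
--         sum(1 for prev, cur in zip(words, words[1:])
--             if cur[1] == "VB" and prev[0] == "going-to")
--         for words in worded_sentences
--     )
--     return marker_count + going_to_count
-- ===== Notes on version B (the rewrite author's own statement) =====
-- stated objective: alternative
-- what changed: Replaces A's single index-based loop (range(len) with words[i]/words[i-1] lookups and a running accumulator) by two independent comprehension passes -- a marker count over all (word, tag) pairs and a zip(words, words[1:]) count of going-to/VB adjacent pairs -- returning their sum.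
import Mathlib
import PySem

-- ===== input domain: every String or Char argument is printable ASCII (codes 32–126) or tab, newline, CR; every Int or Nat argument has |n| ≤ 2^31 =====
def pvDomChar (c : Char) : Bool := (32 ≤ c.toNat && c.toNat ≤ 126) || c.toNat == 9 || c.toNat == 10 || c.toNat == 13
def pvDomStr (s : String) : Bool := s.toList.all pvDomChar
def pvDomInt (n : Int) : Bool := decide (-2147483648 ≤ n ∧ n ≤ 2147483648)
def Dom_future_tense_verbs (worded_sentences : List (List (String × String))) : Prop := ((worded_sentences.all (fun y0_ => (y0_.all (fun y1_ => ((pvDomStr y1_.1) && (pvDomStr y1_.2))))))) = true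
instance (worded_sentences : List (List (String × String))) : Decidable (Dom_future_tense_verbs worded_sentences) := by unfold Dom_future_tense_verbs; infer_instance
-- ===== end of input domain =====

-- B replaces A's single indexed loop with two independent passes (a marker count and a
-- zip-of-adjacent-pairs "going-to VB" count) whose sum is returned; objective: alternative.

-- ===== PORT A =====
-- A's inner loop over i in range(len(words)); indices are always in range, so pyGetD's
-- default is never used.
def future_tense_verbs (worded_sentences : List (List (String × String))) : Int :=
  worded_sentences.foldl (fun s words =>
    (PySem.List.pyRange 0 (words.length : Int) 1).foldl (fun s i =>
      let wt := PySem.List.pyGetD words i ("", "")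
      let s := if ["'ll", "will", "gonna"].contains (PySem.Str.lower wt.1) then s + 1 else s
      if wt.2 = "VB" ∧ 0 < i then
        let pwt := PySem.List.pyGetD words (i - 1) ("", "")
        if pwt.1 = "going-to" then s + 1 else s
      else s) s) 0

-- ===== PORT B =====
def future_tense_verbs_alt (worded_sentences : List (List (String × String))) : Int :=
  let markers := ["'ll", "will", "gonna"]
  let markerCount : Int :=
    (worded_sentences.map (fun words =>
      ((words.countP (fun wt => markers.contains (PySem.Str.lower wt.1))) : Int))).sum
  let goingToCount : Int :=
    (worded_sentences.map (fun words =>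
      (((words.zip (PySem.List.slice words (some 1) none)).countP
          (fun p => p.2.2 == "VB" && p.1.1 == "going-to")) : Int))).sum
  markerCount + goingToCount

-- ===== PRECONDITION & SPEC =====
def Spec_future_tense_verbs (worded_sentences : List (List (String × String))) (out : Int) : Prop := out = future_tense_verbs_alt worded_sentences
instance (worded_sentences : List (List (String × String))) (out : Int) : Decidable (Spec_future_tense_verbs worded_sentences out) := by unfold Spec_future_tense_verbs; infer_instance

-- ===== CLAIM (what is proved, stated in full; the proofs are below) =====
def Claim_equal_future_tense_verbs : Prop := ∀ (worded_sentences : List (List (String × String))), Dom_future_tense_verbs worded_sentences → Spec_future_tense_verbs worded_sentences (future_tense_verbs worded_sentences)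

-- ===== LEMMAS AND PROOFS =====

-- per-sentence marker count (B's first pass)
def pvM (words : List (String × String)) : Int :=
  (words.countP (fun wt => (["'ll", "will", "gonna"] : List String).contains (PySem.Str.lower wt.1)) : Int)

-- per-sentence going-to count (B's second pass, with words[1:] rewritten as tail)
def pvG (words : List (String × String)) : Int :=
  ((words.zip words.tail).countP (fun p => p.2.2 == "VB" && p.1.1 == "going-to") : Int)

-- A's per-step body
def pvStep (words : List (String × String)) (s : Int) (i : Int) : Int :=
  let wt := PySem.List.pyGetD words i ("", "")
  let s := if ["'ll", "will", "gonna"].contains (PySem.Str.lower wt.1) then s + 1 else s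
  if wt.2 = "VB" ∧ 0 < i then
    let pwt := PySem.List.pyGetD words (i - 1) ("", "")
    if pwt.1 = "going-to" then s + 1 else s
  else s

lemma pvM_append (ws : List (String × String)) (x : String × String) :
    pvM (ws ++ [x]) = pvM ws +
      (if (["'ll", "will", "gonna"] : List String).contains (PySem.Str.lower x.1) then 1 else 0) := by
  simp [pvM, List.countP_append, List.countP_cons]

def pvLastContrib (ws : List (String × String)) (x : String × String) : Int :=
  match ws.getLast? with
  | none => 0
  | some p => if x.2 == "VB" && p.1 == "going-to" then 1 else 0

lemma pvG_cons_cons (a b : String × String) (l : List (String × String)) :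
    pvG (a :: b :: l) = (if (b.2 == "VB" && a.1 == "going-to") then (1 : Int) else 0) + pvG (b :: l) := by
  simp only [pvG, List.tail_cons, List.zip_cons_cons, List.countP_cons]
  split_ifs <;> push_cast <;> ring

lemma pvG_append (ws : List (String × String)) (x : String × String) :
    pvG (ws ++ [x]) = pvG ws + pvLastContrib ws x := by
  induction ws with
  | nil => simp [pvG, pvLastContrib]
  | cons a t ih =>
    cases t with
    | nil => simp [pvG, pvLastContrib, List.countP_cons]
    | cons b t' =>
      have h3 : pvLastContrib (a :: b :: t') x = pvLastContrib (b :: t') x := by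
        simp [pvLastContrib]
      rw [show (a :: b :: t') ++ [x] = a :: b :: (t' ++ [x]) by simp]
      rw [pvG_cons_cons, show b :: (t' ++ [x]) = (b :: t') ++ [x] by simp, ih,
        pvG_cons_cons, h3]
      ring

lemma pvStep_append_lt (ws : List (String × String)) (x : String × String) (s i : Int)
    (h0 : 0 ≤ i) (hlt : i < ws.length) :
    pvStep (ws ++ [x]) s i = pvStep ws s i := by
  have hget : PySem.List.pyGetD (ws ++ [x]) i ("", "") = PySem.List.pyGetD ws i ("", "") := by
    rw [PySem.List.pyGetD_eq_getElem _ _ h0 (by rw [List.length_append]; push_cast; omega),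
        PySem.List.pyGetD_eq_getElem _ _ h0 hlt]
    rw [List.getElem_append_left (by omega)]
  have hget' : 0 < i → PySem.List.pyGetD (ws ++ [x]) (i - 1) ("", "") = PySem.List.pyGetD ws (i - 1) ("", "") := by
    intro hp
    rw [PySem.List.pyGetD_eq_getElem _ _ (by omega) (by rw [List.length_append]; push_cast; omega),
        PySem.List.pyGetD_eq_getElem _ _ (by omega) (by omega)]
    rw [List.getElem_append_left (by omega)]
  by_cases hp : 0 < i
  · simp only [pvStep, hget, hget' hp]
  · simp only [pvStep, hget, hp, and_false, if_false]

-- the inner loop of A computes s + pvM + pvG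
lemma pvInner (words : List (String × String)) (s : Int) :
    (PySem.List.pyRange 0 (words.length : Int) 1).foldl (pvStep words) s
      = s + pvM words + pvG words := by
  induction words using List.reverseRecOn generalizing s with
  | nil => simp [pvM, pvG, PySem.List.pyRange_one_eq_nil]
  | append_singleton ws x ih =>
    have hn : ((ws ++ [x]).length : Int) = (ws.length : Int) + 1 := by simp
    rw [hn, PySem.List.pyRange_one_succ_right (Int.natCast_nonneg _)]
    rw [List.foldl_append]
    have hcongr : (PySem.List.pyRange 0 (ws.length : Int) 1).foldl (pvStep (ws ++ [x])) s
        = (PySem.List.pyRange 0 (ws.length : Int) 1).foldl (pvStep ws) s := by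
      apply PySem.List.foldl_congr_mem
      intro a i hi
      have h := (PySem.List.mem_pyRange_one).1 hi
      exact pvStep_append_lt ws x a i h.1 h.2
    rw [hcongr, ih, pvM_append, pvG_append]
    have hlast : PySem.List.pyGetD (ws ++ [x]) (ws.length : Int) ("", "") = x := by
      rw [PySem.List.pyGetD_eq_getElem _ _ (Int.natCast_nonneg _) (by simp)]
      simp
    rcases eq_or_ne ws [] with rfl | hne
    · simp only [List.nil_append, List.length_nil, Nat.cast_zero] at hlast
      simp only [List.foldl_cons, List.foldl_nil, List.length_nil, Nat.cast_zero, pvStep]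
      simp only [pvM, pvG, pvLastContrib, List.countP_nil, List.getLast?_nil]
      simp
      split_ifs <;> ring
    · have hl : 0 < ws.length := List.length_pos_of_ne_nil hne
      have hprev : PySem.List.pyGetD (ws ++ [x]) ((ws.length : Int) - 1) ("", "")
          = ws.getLast hne := by
        rw [PySem.List.pyGetD_eq_getElem _ _ (by omega) (by simp)]
        rw [List.getElem_append_left (by omega)]
        rw [List.getLast_eq_getElem]
        congr 1
        omega
      have hlc : pvLastContrib ws x
          = if x.2 == "VB" && (ws.getLast hne).1 == "going-to" then (1 : Int) else 0 := by
        simp [pvLastContrib, List.getLast?_eq_some_getLast hne]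
      simp only [List.foldl_cons, List.foldl_nil, pvStep, hlast, hprev, hlc]
      have hpos : (0 : Int) < (ws.length : Int) := by exact_mod_cast hl
      simp only [hpos, and_true]
      split_ifs <;> simp_all <;> ring

-- the outer loop
lemma pvOuter (ws : List (List (String × String))) (s : Int) :
    ws.foldl (fun s words =>
      (PySem.List.pyRange 0 (words.length : Int) 1).foldl (pvStep words) s) s
      = s + (ws.map (fun w => pvM w + pvG w)).sum := by
  induction ws generalizing s with
  | nil => simp
  | cons w t ih => rw [List.foldl_cons, ih, pvInner]; simp; ring

-- ===== VERDICT (by name: the statement is the Claim_ definition above) =====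
theorem future_tense_verbs_spec : Claim_equal_future_tense_verbs := by
  intro ws _
  show future_tense_verbs ws = future_tense_verbs_alt ws
  have h : future_tense_verbs ws = 0 + (ws.map (fun w => pvM w + pvG w)).sum := pvOuter ws 0
  rw [h, zero_add, PySem.List.sum_map_add_int]
  simp only [future_tense_verbs_alt]
  congr 1
  exact congrArg List.sum (List.map_congr_left fun w _ => by simp [pvG, PySem.List.slice_from_one])
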